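-- pv_equiv track=rewrite | github.com/jang1563/manuscript-writing-harness | scripts/figures_bundle.py | _canonical_display_order
-- ===== SOURCE A (Python) =====
-- from typing import Any
--
-- def bundle_figure_ids(bundle: dict[str, Any]) -> list[str]:
--     return [str(item["figure_id"]) for item in bundle["figures"]]
--
-- def _canonical_display_order(existing_items: list[dict[str, Any]], bundles: list[dict[str, Any]]) -> list[str]:
--     bundle_ids = [figure_id for bundle in bundles for figure_id in bundle_figure_ids(bundle)]
--     bundle_set = set(bundle_ids)
--     existing_ids = [str(item.get("display_item_id")) for item in existing_items]
--     existing_bundle_positions = [index for index, item_id in enumerate(existing_ids) if item_id in bundle_set]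
--     if existing_bundle_positions:
--         prefix_cutoff = min(existing_bundle_positions)
--         suffix_cutoff = max(existing_bundle_positions)
--         prefix = [item_id for item_id in existing_ids[:prefix_cutoff] if item_id not in bundle_set]
--         suffix = [item_id for item_id in existing_ids[suffix_cutoff + 1 :] if item_id not in bundle_set]
--     else:
--         prefix = [item_id for item_id in existing_ids if item_id not in bundle_set]
--         suffix = []
--     return prefix + bundle_ids + suffix
-- ===== SOURCE B (Python) =====
-- from typing import Any
--
--
-- def bundle_figure_ids(bundle: dict[str, Any]) -> list[str]:
--     return [str(item["figure_id"]) for item in bundle["figures"]]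
--
--
-- def _canonical_display_order(existing_items: list[dict[str, Any]], bundles: list[dict[str, Any]]) -> list[str]:
--     bundle_ids = [figure_id for bundle in bundles for figure_id in bundle_figure_ids(bundle)]
--     bundle_set = set(bundle_ids)
--     existing_ids = [str(item.get("display_item_id")) for item in existing_items]
--     prefix = []
--     found = False
--     for item_id in existing_ids:
--         if item_id in bundle_set:
--             found = True
--             break
--         prefix.append(item_id)
--     suffix = []
--     if found:
--         for item_id in reversed(existing_ids):
--             if item_id in bundle_set:
--                 break
--             suffix.append(item_id)
--         suffix.reverse()
--     return prefix + bundle_ids + suffix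
-- ===== Notes on version B (the rewrite author's own statement) =====
-- stated objective: alternative
-- what changed: Instead of building the list of bundle-id positions and slicing/filtering around its min and max, B does two early-exit scans: it collects ids from the front until the first bundle id, and (only if one was found) from the back until the last bundle id, reversing that to form the suffix.
import Mathlib
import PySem

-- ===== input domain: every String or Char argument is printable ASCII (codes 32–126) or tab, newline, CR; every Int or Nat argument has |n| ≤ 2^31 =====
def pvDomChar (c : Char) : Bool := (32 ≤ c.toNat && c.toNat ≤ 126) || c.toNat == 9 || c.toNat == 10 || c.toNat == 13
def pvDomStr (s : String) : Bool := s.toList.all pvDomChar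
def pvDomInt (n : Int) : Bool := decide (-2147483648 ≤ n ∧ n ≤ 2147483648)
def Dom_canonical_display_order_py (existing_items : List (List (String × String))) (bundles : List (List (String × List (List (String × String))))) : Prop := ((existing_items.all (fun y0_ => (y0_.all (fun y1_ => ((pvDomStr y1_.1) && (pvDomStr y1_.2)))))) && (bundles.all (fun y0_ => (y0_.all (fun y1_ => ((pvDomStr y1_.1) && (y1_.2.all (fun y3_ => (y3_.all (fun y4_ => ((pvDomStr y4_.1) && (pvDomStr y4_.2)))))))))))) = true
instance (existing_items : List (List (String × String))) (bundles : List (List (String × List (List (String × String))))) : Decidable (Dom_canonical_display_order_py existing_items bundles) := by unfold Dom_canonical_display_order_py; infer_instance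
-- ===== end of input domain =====

-- B replaces A's positions-list/min-max/slice assembly by two early-exit scans (front until the
-- first bundle id, back until the last); same asymptotic cost, a different decomposition.


-- ===== PORT A =====
-- bundle_figure_ids: [str(item["figure_id"]) for item in bundle["figures"]].  Values here are
-- strings, so str(...) is the identity; dict[k] raising KeyError is get? = none, excluded by
-- Pre_, so the .getD defaults are never reached on admitted inputs (both Pythons share this
-- helper verbatim, so both ports do too).
def pvBundleFigureIds (bundle : List (String × List (List (String × String)))) : List String :=
  ((PySem.Dict.mk bundle).getD "figures" []).map
    (fun item => (PySem.Dict.mk item).getD "figure_id" "")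

-- str(item.get("display_item_id")): str of a missing key's None is "None", of a string the string
def pvStrOfOpt : Option String → String
  | none => "None"
  | some s => s

-- 'if existing_bundle_positions:' is the non-empty test; min()/max() run only on the non-empty
-- list, so their .getD defaults are never reached
def canonical_display_order_py (existing_items : List (List (String × String))) (bundles : List (List (String × List (List (String × String))))) : List String :=
  let bundle_ids := bundles.flatMap pvBundleFigureIds
  let bundle_set := PySem.Set.ofList bundle_ids
  let existing_ids := existing_items.map (fun item => pvStrOfOpt ((PySem.Dict.mk item).get? "display_item_id"))
  let positions := ((PySem.List.enumerate existing_ids 0).filter (fun q => PySem.Set.contains bundle_set q.2)).map (fun q => q.1)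
  if positions = [] then
    existing_ids.filter (fun i => !(PySem.Set.contains bundle_set i)) ++ bundle_ids ++ []
  else
    let prefix_cutoff := (PySem.List.min? positions (fun x => x)).getD 0
    let suffix_cutoff := (PySem.List.max? positions (fun x => x)).getD 0
    (PySem.List.slice existing_ids none (some prefix_cutoff)).filter (fun i => !(PySem.Set.contains bundle_set i)) ++ bundle_ids ++
    (PySem.List.slice existing_ids (some (suffix_cutoff + 1)) none).filter (fun i => !(PySem.Set.contains bundle_set i))

-- ===== PORT B =====
-- the front scan: ids collected until the first bundle id, plus whether one was found (break hit)
def pvScanUntil (bundle_set : PySem.Set String) : List String → List String × Bool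
  | [] => ([], false)
  | x :: xs =>
      if PySem.Set.contains bundle_set x then ([], true)
      else
        let r := pvScanUntil bundle_set xs
        (x :: r.1, r.2)

def canonical_display_order_py_alt (existing_items : List (List (String × String))) (bundles : List (List (String × List (List (String × String))))) : List String :=
  let bundle_ids := bundles.flatMap pvBundleFigureIds
  let bundle_set := PySem.Set.ofList bundle_ids
  let existing_ids := existing_items.map (fun item => pvStrOfOpt ((PySem.Dict.mk item).get? "display_item_id"))
  let pf := pvScanUntil bundle_set existing_ids
  let suffix := if pf.2 then (pvScanUntil bundle_set existing_ids.reverse).1.reverse else []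
  pf.1 ++ bundle_ids ++ suffix

-- ===== PRECONDITION & SPEC =====
-- Pre_ excludes exactly the inputs where the Python A raises KeyError: a bundle without a
-- "figures" key, or a figure entry without a "figure_id" key (B raises there identically).
def Pre_canonical_display_order_py (existing_items : List (List (String × String))) (bundles : List (List (String × List (List (String × String))))) : Prop :=
  ∀ b ∈ bundles, (PySem.Dict.mk b).contains "figures" = true ∧
    ∀ item ∈ (PySem.Dict.mk b).getD "figures" [], (PySem.Dict.mk item).contains "figure_id" = true
instance (existing_items : List (List (String × String))) (bundles : List (List (String × List (List (String × String))))) : Decidable (Pre_canonical_display_order_py existing_items bundles) := by unfold Pre_canonical_display_order_py; infer_instance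

def pvWitness_canonical_display_order_py : (List (List (String × String))) × (List (List (String × List (List (String × String))))) :=
  ([[("display_item_id", "x")], [("display_item_id", "f1")], [("display_item_id", "y")]],
   [[("figures", [[("figure_id", "f1")], [("figure_id", "f2")]])]])

def Spec_canonical_display_order_py (existing_items : List (List (String × String))) (bundles : List (List (String × List (List (String × String))))) (out : List String) : Prop := out = canonical_display_order_py_alt existing_items bundles
instance (existing_items : List (List (String × String))) (bundles : List (List (String × List (List (String × String))))) (out : List String) : Decidable (Spec_canonical_display_order_py existing_items bundles out) := by unfold Spec_canonical_display_order_py; infer_instance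

-- ===== CLAIM (what is proved, stated in full; the proofs are below) =====
def Claim_equal_canonical_display_order_py : Prop := ∀ (existing_items : List (List (String × String))) (bundles : List (List (String × List (List (String × String))))), Dom_canonical_display_order_py existing_items bundles → Pre_canonical_display_order_py existing_items bundles → Spec_canonical_display_order_py existing_items bundles (canonical_display_order_py existing_items bundles)

-- ===== LEMMAS AND PROOFS =====

-- B's front scan returns the longest non-bundle prefix together with the 'found' flag
theorem pvScanUntil_eq (s : PySem.Set String) (ids : List String) :
    pvScanUntil s ids =
      (ids.takeWhile (fun x => !(PySem.Set.contains s x)), ids.any (fun x => PySem.Set.contains s x)) := by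
  induction ids with
  | nil => simp [pvScanUntil]
  | cons x xs ih =>
      by_cases h : x ∈ s
      · simp [pvScanUntil, h]
      · simp [pvScanUntil, h, List.takeWhile, ih]

-- A's positions list ([index for index, id in enumerate(ids) if p id]), with generic start n
def posL (p : String → Bool) (n : Int) (ids : List String) : List Int :=
  ((PySem.List.enumerate ids n).filter (fun q => p q.2)).map (fun q => q.1)

theorem posL_cons (p : String → Bool) (n : Int) (x : String) (xs : List String) :
    posL p n (x :: xs) = if p x then n :: posL p (n+1) xs else posL p (n+1) xs := by
  by_cases h : p x <;> simp [posL, PySem.List.enumerate_cons, h]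

theorem posL_empty (p : String → Bool) (n : Int) (ids : List String) (h : ids.any p = false) :
    posL p n ids = [] := by
  induction ids generalizing n with
  | nil => rfl
  | cons x xs ih =>
      simp only [List.any_cons, Bool.or_eq_false_iff] at h
      rw [posL_cons, if_neg (by simp [h.1]), ih _ h.2]

theorem posL_head (p : String → Bool) (n : Int) (ids : List String) (h : ids.any p = true) :
    ∃ rest, posL p n ids = (n + ((ids.takeWhile (fun x => !(p x))).length : Int)) :: rest := by
  induction ids generalizing n with
  | nil => simp at h
  | cons x xs ih =>
      by_cases hx : p x
      · exact ⟨posL p (n+1) xs, by simp [posL_cons, hx]⟩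
      · have hany : xs.any p = true := by simpa [hx] using h
        obtain ⟨rest, hr⟩ := ih (n+1) hany
        refine ⟨rest, ?_⟩
        rw [posL_cons, if_neg (by simp [hx]), hr]
        simp [List.takeWhile, hx]
        ring

theorem posL_pairwise (p : String → Bool) (n : Int) (ids : List String) :
    (posL p n ids).Pairwise (· < ·) := by
  have h1 := PySem.List.pairwise_lt_enumerate ids n
  have h2 := h1.filter (fun q => p q.2)
  exact List.pairwise_map.2 h2

theorem foldl_min_of_lb (x : Int) (t : List Int) (h : ∀ y ∈ t, x ≤ y) : t.foldl min x = x := by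
  induction t generalizing x with
  | nil => rfl
  | cons y ys ih =>
      simp only [List.foldl_cons]
      rw [min_eq_left (h y (by simp))]
      exact ih x (fun z hz => h z (by simp [hz]))

theorem foldl_max_of_pairwise (x : Int) (t : List Int) (h : (x :: t).Pairwise (· < ·)) :
    t.foldl max x = (x :: t).getLast (by simp) := by
  induction t generalizing x with
  | nil => rfl
  | cons y ys ih =>
      simp only [List.foldl_cons]
      have hxy : x < y := (List.pairwise_cons.1 h).1 y (by simp)
      rw [max_eq_right hxy.le]
      rw [ih y ((List.pairwise_cons.1 h).2)]
      simp [List.getLast_cons]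

-- the last position, by reverse induction on ids
theorem posL_last (p : String → Bool) (ids : List String) (h : ids.any p = true) :
    posL p 0 ids ≠ [] ∧
    (posL p 0 ids).getLast? = some ((ids.length - (ids.reverse.takeWhile (fun x => !(p x))).length - 1 : Nat) : Int) := by
  induction ids using List.reverseRecOn with
  | nil => simp at h
  | append_singleton xs x ih =>
      have hsplit : posL p 0 (xs ++ [x]) = posL p 0 xs ++ (if p x then [(xs.length : Int)] else []) := by
        by_cases hx : p x <;>
          simp [posL, PySem.List.enumerate_append, PySem.List.enumerate_cons, PySem.List.enumerate_nil, hx]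
      by_cases hx : p x
      · constructor
        · rw [hsplit]; simp [hx]
        · rw [hsplit]
          simp [hx]
      · have hany : xs.any p = true := by simpa [hx] using h
        obtain ⟨hne, hlast⟩ := ih hany
        have hkR : ((xs ++ [x]).reverse.takeWhile (fun y => !(p y))).length
            = (xs.reverse.takeWhile (fun y => !(p y))).length + 1 := by
          simp [hx]
        constructor
        · rw [hsplit]; simp [hx, hne]
        · rw [hsplit]
          rw [if_neg (by simp [hx]), List.append_nil, hlast]
          congr 1
          rw [hkR]
          simp only [List.length_append, List.length_singleton]
          omega

theorem take_takeWhile (q : String → Bool) (l : List String) :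
    l.take (l.takeWhile q).length = l.takeWhile q := by
  induction l with
  | nil => rfl
  | cons x xs ih =>
      by_cases h : q x
      · simp [h, ih]
      · simp [h]

theorem drop_rev_takeWhile (q : String → Bool) (l : List String) :
    l.drop (l.length - (l.reverse.takeWhile q).length) = (l.reverse.takeWhile q).reverse := by
  set tw := l.reverse.takeWhile q with htw
  set dw := l.reverse.dropWhile q with hdw
  have hl : l = dw.reverse ++ tw.reverse := by
    conv_lhs => rw [← List.reverse_reverse l]
    rw [← List.takeWhile_append_dropWhile (p := q) (l := l.reverse), ← htw, ← hdw, List.reverse_append]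
  rw [hl, show (dw.reverse ++ tw.reverse).length - tw.length = dw.reverse.length by simp]
  exact List.drop_left

theorem filter_takeWhile (q : String → Bool) (l : List String) :
    (l.takeWhile q).filter q = l.takeWhile q :=
  List.filter_eq_self.mpr (fun _ hx => List.mem_takeWhile_imp hx)

theorem min?_posL (p : String → Bool) (ids : List String) (h : ids.any p = true) :
    PySem.List.min? (posL p 0 ids) (fun x => x) = some (((ids.takeWhile (fun x => !(p x))).length : Nat) : Int) := by
  obtain ⟨rest, hr⟩ := posL_head p 0 ids h
  have hpw := posL_pairwise p 0 ids
  rw [hr] at hpw ⊢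
  rw [PySem.List.min?_id_cons]
  rw [foldl_min_of_lb _ _ (fun y hy => ((List.pairwise_cons.1 hpw).1 y hy).le)]
  norm_num

theorem max?_posL (p : String → Bool) (ids : List String) (h : ids.any p = true) :
    PySem.List.max? (posL p 0 ids) (fun x => x) = some ((ids.length - (ids.reverse.takeWhile (fun x => !(p x))).length - 1 : Nat) : Int) := by
  obtain ⟨hne, hlast⟩ := posL_last p ids h
  obtain ⟨c, t, hct⟩ := List.exists_cons_of_ne_nil hne
  have hpw := posL_pairwise p 0 ids
  rw [hct] at hpw hlast ⊢
  rw [PySem.List.max?_id_cons, foldl_max_of_pairwise c t hpw]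
  rw [List.getLast?_eq_getLast_of_ne_nil (by simp)] at hlast
  simpa using hlast

theorem tw_lt (p : String → Bool) (ids : List String) (h : ids.any p = true) :
    (ids.reverse.takeWhile (fun x => !(p x))).length < ids.length := by
  have hle : (ids.reverse.takeWhile (fun x => !(p x))).length ≤ ids.length := by
    simpa using (List.takeWhile_prefix (l := ids.reverse) (fun x => !(p x))).length_le
  refine lt_of_le_of_ne hle ?_
  intro heq
  have htw : ids.reverse.takeWhile (fun x => !(p x)) = ids.reverse := by
    have ht := take_takeWhile (fun x => !(p x)) ids.reverse
    rw [heq, ← List.length_reverse (as := ids), List.take_length] at ht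
    exact ht.symm
  obtain ⟨x, hx, hpx⟩ := List.any_eq_true.1 h
  have hmem : x ∈ ids.reverse.takeWhile (fun x => !(p x)) := by
    rw [htw]; exact List.mem_reverse.2 hx
  have := List.mem_takeWhile_imp hmem
  simp [hpx] at this

-- the heart of the proof: A's min/max-slice assembly equals B's takeWhile-shaped scans
theorem main_eq (p : String → Bool) (ids tail : List String) :
    (if (posL p 0 ids) = [] then
        ids.filter (fun i => !(p i)) ++ tail ++ []
     else
        (PySem.List.slice ids none (some ((PySem.List.min? (posL p 0 ids) (fun x => x)).getD 0))).filter (fun i => !(p i)) ++ tail ++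
        (PySem.List.slice ids (some ((PySem.List.max? (posL p 0 ids) (fun x => x)).getD 0 + 1)) none).filter (fun i => !(p i)))
    = ids.takeWhile (fun x => !(p x)) ++ tail ++ (if ids.any p then (ids.reverse.takeWhile (fun x => !(p x))).reverse else []) := by
  by_cases h : ids.any p
  · have hne : posL p 0 ids ≠ [] := (posL_last p ids h).1
    have hk := tw_lt p ids h
    rw [if_neg hne, if_pos h, min?_posL p ids h, max?_posL p ids h]
    simp only [Option.getD_some]
    rw [PySem.List.slice_to_natCast, take_takeWhile, filter_takeWhile]
    rw [show ((ids.length - (ids.reverse.takeWhile (fun x => !(p x))).length - 1 : Nat) : Int) + 1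
        = ((ids.length - (ids.reverse.takeWhile (fun x => !(p x))).length : Nat) : Int) by omega]
    rw [PySem.List.slice_from_natCast, drop_rev_takeWhile, List.filter_reverse, filter_takeWhile]
  · have h' : ids.any p = false := by simpa using h
    have hall : ∀ x ∈ ids, (!(p x)) = true := by
      intro x hx
      simp only [List.any_eq_false] at h'
      simp [h' x hx]
    rw [if_pos (posL_empty p 0 ids h'), if_neg h, List.filter_eq_self.mpr hall,
        List.takeWhile_eq_self_iff.mpr hall]

-- main_eq specialised to a bundle set, with B's side written via pvScanUntil
theorem combined (s : PySem.Set String) (ids tail : List String) :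
    (if ((PySem.List.enumerate ids 0).filter (fun q => PySem.Set.contains s q.2)).map (fun q => q.1) = [] then
        ids.filter (fun i => !(PySem.Set.contains s i)) ++ tail ++ []
     else
        (PySem.List.slice ids none (some ((PySem.List.min? (((PySem.List.enumerate ids 0).filter (fun q => PySem.Set.contains s q.2)).map (fun q => q.1)) (fun x => x)).getD 0))).filter (fun i => !(PySem.Set.contains s i)) ++ tail ++
        (PySem.List.slice ids (some ((PySem.List.max? (((PySem.List.enumerate ids 0).filter (fun q => PySem.Set.contains s q.2)).map (fun q => q.1)) (fun x => x)).getD 0 + 1)) none).filter (fun i => !(PySem.Set.contains s i)))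
    = (pvScanUntil s ids).1 ++ tail ++ (if (pvScanUntil s ids).2 then (pvScanUntil s ids.reverse).1.reverse else []) := by
  rw [pvScanUntil_eq s ids, pvScanUntil_eq s ids.reverse]
  exact main_eq (fun x => PySem.Set.contains s x) ids tail

-- ===== VERDICT (by name: the statement is the Claim_ definition above) =====
theorem canonical_display_order_py_spec : Claim_equal_canonical_display_order_py := by
  intro existing_items bundles _ _
  exact combined _ _ _
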